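-- pv_equiv track=rewrite | github.com/nicu1999/IA | tema 3 ia/ia-tema3.py | sub_dic
-- ===== SOURCE A (Python) =====
-- def sub_dic(news_words, abstr_words):
--     news_but_not_abstr_word_count = 0
--     news_but_not_abstr = {}
--     for word in news_words:
--         if not word in abstr_words:
--             news_but_not_abstr[word] = news_words[word]
--             news_but_not_abstr_word_count += news_words[word]
--         else:
--             if news_words[word] - abstr_words[word] < 0:
--                 news_but_not_abstr[word] = 0
--             else:
--                 news_but_not_abstr[word] = news_words[word] - abstr_words[word]
--                 news_but_not_abstr_word_count += news_words[word] - abstr_words[word]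
--     return (news_but_not_abstr, news_but_not_abstr_word_count)
-- ===== SOURCE B (Python) =====
-- def sub_dic(news_words, abstr_words):
--     # Start from a copy of news_words, then walk the *other* dict: for every
--     # abstract word present in the copy, clamp-subtract its count in place
--     # (updating an existing key keeps its position). Count is a final pass.
--     result = dict(news_words)
--     for word, cnt in abstr_words.items():
--         if word in result:
--             result[word] = max(0, result[word] - cnt)
--     return (result, sum(result.values()))
-- ===== Notes on version B (the rewrite author's own statement) =====
-- stated objective: alternative
-- what changed: Instead of A's single loop over news_words with a branching count accumulator, B copies news_words, then loops over abstr_words clamp-subtracting in place at the keys the copy contains (in-place updates keep insertion order), and computes the count as a final sum over the result's values.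
import Mathlib
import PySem

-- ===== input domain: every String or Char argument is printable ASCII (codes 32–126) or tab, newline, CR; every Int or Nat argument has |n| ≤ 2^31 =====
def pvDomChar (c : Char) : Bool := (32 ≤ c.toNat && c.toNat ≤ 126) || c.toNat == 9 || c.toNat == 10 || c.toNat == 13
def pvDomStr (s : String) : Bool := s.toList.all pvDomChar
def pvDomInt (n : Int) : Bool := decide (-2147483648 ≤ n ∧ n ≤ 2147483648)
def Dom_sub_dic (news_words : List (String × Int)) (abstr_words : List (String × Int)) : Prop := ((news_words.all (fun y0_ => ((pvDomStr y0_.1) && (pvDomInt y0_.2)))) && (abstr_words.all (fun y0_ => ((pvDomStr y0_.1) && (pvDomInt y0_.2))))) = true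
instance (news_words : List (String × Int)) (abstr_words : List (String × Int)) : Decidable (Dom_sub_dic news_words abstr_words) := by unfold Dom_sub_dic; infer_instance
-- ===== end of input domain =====

-- B copies news_words, walks abstr_words clamp-subtracting in place at keys the copy contains,
-- and counts by a final sum over the result's values (alternative decomposition, loop over the other dict).


-- ===== PORT A =====
-- the assoc-list arguments denote Python dicts: Dict.ofList reconstructs them (later value wins, first position kept)
def sub_dic (news_words : List (String × Int)) (abstr_words : List (String × Int)) : (List (String × Int)) × Int :=
  let nd := PySem.Dict.ofList news_words
  let ad := PySem.Dict.ofList abstr_words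
  let st := nd.items.foldl (fun (s : PySem.Dict String Int × Int) p =>
      let word := p.1
      if ¬ (ad.contains word = true) then
        (s.1.insert word (nd.getD word 0), s.2 + nd.getD word 0)
      else if nd.getD word 0 - ad.getD word 0 < 0 then
        (s.1.insert word 0, s.2)
      else
        (s.1.insert word (nd.getD word 0 - ad.getD word 0),
         s.2 + (nd.getD word 0 - ad.getD word 0)))
    (PySem.Dict.empty, 0)
  (st.1.items, st.2)

-- ===== PORT B =====
def sub_dic_alt (news_words : List (String × Int)) (abstr_words : List (String × Int)) : (List (String × Int)) × Int :=
  let res := (PySem.Dict.ofList abstr_words).items.foldl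
      (fun (d : PySem.Dict String Int) p =>
        if d.contains p.1 then d.insert p.1 (max 0 (d.getD p.1 0 - p.2)) else d)
      (PySem.Dict.ofList news_words)
  (res.items, res.values.sum)

-- ===== PRECONDITION & SPEC =====
def Spec_sub_dic (news_words : List (String × Int)) (abstr_words : List (String × Int)) (out : (List (String × Int)) × Int) : Prop := out = sub_dic_alt news_words abstr_words
instance (news_words : List (String × Int)) (abstr_words : List (String × Int)) (out : (List (String × Int)) × Int) : Decidable (Spec_sub_dic news_words abstr_words out) := by unfold Spec_sub_dic; infer_instance

-- ===== CLAIM (what is proved, stated in full; the proofs are below) =====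
def Claim_equal_sub_dic : Prop := ∀ (news_words : List (String × Int)) (abstr_words : List (String × Int)), Dom_sub_dic news_words abstr_words → Spec_sub_dic news_words abstr_words (sub_dic news_words abstr_words)

-- ===== LEMMAS AND PROOFS =====

-- the per-word value both programs end up storing for a news word
def pvBVal (ad : PySem.Dict String Int) (p : String × Int) : String × Int :=
  (p.1, if ad.contains p.1 then max 0 (p.2 - ad.getD p.1 0) else p.2)

-- A's loop, run from any state over a fresh, nodup-keyed, value-consistent chunk of nd's items,
-- appends exactly the pvBVal pairs and adds exactly their values to the count.
theorem sub_dic_loop (nd ad : PySem.Dict String Int) :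
    ∀ (l : List (String × Int)) (d : PySem.Dict String Int) (c : Int),
      (l.map (·.1)).Nodup →
      (∀ p ∈ l, d.contains p.1 = false) →
      (∀ p ∈ l, nd.getD p.1 0 = p.2) →
      (l.foldl (fun (s : PySem.Dict String Int × Int) p =>
        if ¬ (ad.contains p.1 = true) then
          (s.1.insert p.1 (nd.getD p.1 0), s.2 + nd.getD p.1 0)
        else if nd.getD p.1 0 - ad.getD p.1 0 < 0 then
          (s.1.insert p.1 0, s.2)
        else
          (s.1.insert p.1 (nd.getD p.1 0 - ad.getD p.1 0),
           s.2 + (nd.getD p.1 0 - ad.getD p.1 0))) (d, c)).1.items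
        = d.items ++ l.map (pvBVal ad) ∧
      (l.foldl (fun (s : PySem.Dict String Int × Int) p =>
        if ¬ (ad.contains p.1 = true) then
          (s.1.insert p.1 (nd.getD p.1 0), s.2 + nd.getD p.1 0)
        else if nd.getD p.1 0 - ad.getD p.1 0 < 0 then
          (s.1.insert p.1 0, s.2)
        else
          (s.1.insert p.1 (nd.getD p.1 0 - ad.getD p.1 0),
           s.2 + (nd.getD p.1 0 - ad.getD p.1 0))) (d, c)).2
        = c + (l.map (fun p => (pvBVal ad p).2)).sum := by
  intro l
  induction l with
  | nil => intro d c _ _ _; simp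
  | cons p t ih =>
    intro d c hnd hfresh hval
    have hv : nd.getD p.1 0 = p.2 := hval p (by simp)
    have hfp : d.contains p.1 = false := hfresh p (by simp)
    have hstep :
        (if ¬ (ad.contains p.1 = true) then
          (d.insert p.1 (nd.getD p.1 0), c + nd.getD p.1 0)
        else if nd.getD p.1 0 - ad.getD p.1 0 < 0 then
          (d.insert p.1 0, c)
        else
          (d.insert p.1 (nd.getD p.1 0 - ad.getD p.1 0),
           c + (nd.getD p.1 0 - ad.getD p.1 0)))
        = (d.insert p.1 (pvBVal ad p).2, c + (pvBVal ad p).2) := by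
      rw [hv]
      unfold pvBVal
      by_cases hc : ad.contains p.1 = true
      · simp only [hc, if_true, not_true, if_false]
        by_cases hlt : p.2 - ad.getD p.1 0 < 0
        · simp only [hlt, if_true]
          have : max 0 (p.2 - ad.getD p.1 0) = 0 := by omega
          rw [this]; simp
        · simp only [hlt, if_false]
          have : max 0 (p.2 - ad.getD p.1 0) = p.2 - ad.getD p.1 0 := by omega
          rw [this]
      · simp [hc]
    have hins : (d.insert p.1 (pvBVal ad p).2).items = d.items ++ [(p.1, (pvBVal ad p).2)] := by
      simp [PySem.Dict.items_insert, hfp]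
    have htfresh : ∀ q ∈ t, (d.insert p.1 (pvBVal ad p).2).contains q.1 = false := by
      intro q hq
      have hne : q.1 ≠ p.1 := by
        simp only [List.map_cons, List.nodup_cons] at hnd
        intro h; exact hnd.1 (h ▸ List.mem_map_of_mem hq)
      rw [PySem.Dict.contains_insert]
      simp [hne, hfresh q (by simp [hq])]
    have ihr := ih (d.insert p.1 (pvBVal ad p).2) (c + (pvBVal ad p).2)
      (by simp only [List.map_cons, List.nodup_cons] at hnd; exact hnd.2)
      htfresh (fun q hq => hval q (by simp [hq]))
    constructor
    · simp only [List.foldl_cons, hstep, ihr.1, hins, List.map_cons]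
      simp [pvBVal]
    · simp only [List.foldl_cons, hstep, ihr.2, List.map_cons, List.sum_cons]
      ring

-- B's loop: folding the clamp-update over a nodup-keyed chunk l of ad's items rewrites each
-- stored item whose key occurs in l to its pvBVal pair and leaves the others alone.
theorem sub_dic_alt_loop (ad : PySem.Dict String Int) :
    ∀ (l : List (String × Int)) (d : PySem.Dict String Int),
      (l.map (·.1)).Nodup →
      (∀ p ∈ l, ad.contains p.1 = true) →
      (∀ p ∈ l, ad.getD p.1 0 = p.2) →
      d.keys.Nodup →
      (l.foldl (fun (d : PySem.Dict String Int) p =>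
          if d.contains p.1 then d.insert p.1 (max 0 (d.getD p.1 0 - p.2)) else d) d).items
        = d.items.map (fun q => if q.1 ∈ l.map (·.1) then pvBVal ad q else q) := by
  intro l
  induction l with
  | nil => intro d _ _ _ _; simp
  | cons p t ih =>
    intro d hnd hcont hval hdnd
    have hpc : ad.contains p.1 = true := hcont p (by simp)
    have hpv : ad.getD p.1 0 = p.2 := hval p (by simp)
    have hpnint : p.1 ∉ t.map (·.1) := by
      simp only [List.map_cons, List.nodup_cons] at hnd; exact hnd.1
    have htnd : (t.map (·.1)).Nodup := by
      simp only [List.map_cons, List.nodup_cons] at hnd; exact hnd.2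
    by_cases hdc : d.contains p.1 = true
    · -- the key is present: one overwrite, then the tail loop
      have hins : (d.insert p.1 (max 0 (d.getD p.1 0 - p.2))).items
          = d.items.map (fun q => if q.1 == p.1 then (p.1, max 0 (d.getD p.1 0 - p.2)) else q) :=
        PySem.Dict.items_insert_of_contains d _ hdc
      have hdnd' : (d.insert p.1 (max 0 (d.getD p.1 0 - p.2))).keys.Nodup :=
        PySem.Dict.nodup_keys_insert _ _ _ hdnd
      simp only [List.foldl_cons, if_pos hdc]
      rw [ih _ htnd (fun q hq => hcont q (by simp [hq])) (fun q hq => hval q (by simp [hq])) hdnd',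
        hins, List.map_map]
      refine List.map_congr_left ?_
      intro q hq
      simp only [Function.comp]
      by_cases hqp : q.1 = p.1
      · have hdg : d.getD p.1 0 = q.2 := by
          rw [← hqp]
          exact PySem.Dict.getD_of_mem_items d hq hdnd 0
        simp only [hqp, beq_self_eq_true, if_true, List.map_cons, List.mem_cons]
        have : p.1 ∉ t.map (·.1) := hpnint
        simp only [pvBVal, hqp, hpc, hpv, hdg]
        simp [this]
      · have : (q.1 == p.1) = false := by simp [hqp]
        simp only [this, Bool.false_eq_true, if_false, List.map_cons]
        by_cases hm : q.1 ∈ t.map (·.1)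
        · simp [List.mem_cons, hm, hqp]
        · simp [List.mem_cons, hm, hqp]
    · -- the key is absent from d: no-op step, and no stored item carries it
      simp only [List.foldl_cons, hdc, Bool.false_eq_true, if_false]
      rw [ih _ htnd (fun q hq => hcont q (by simp [hq])) (fun q hq => hval q (by simp [hq])) hdnd]
      refine List.map_congr_left ?_
      intro q hq
      have hqp : q.1 ≠ p.1 := by
        intro h
        have : d.contains q.1 = true := by
          rw [PySem.Dict.contains_iff_mem_keys]
          exact PySem.Dict.mem_keys_of_mem_items d hq
        rw [h] at this; rw [this] at hdc; exact absurd rfl hdc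
      by_cases hm : q.1 ∈ t.map (·.1)
      · simp [List.mem_cons, hm, hqp]
      · simp [List.mem_cons, hm, hqp]

-- ===== VERDICT (by name: the statement is the Claim_ definition above) =====
theorem sub_dic_spec : Claim_equal_sub_dic := by
  intro news_words abstr_words _
  unfold Spec_sub_dic sub_dic sub_dic_alt
  dsimp only
  set nd := PySem.Dict.ofList news_words with hnd
  set ad := PySem.Dict.ofList abstr_words with had
  have hnnodup : (nd.items.map (·.1)).Nodup := PySem.Dict.nodup_keys_ofList news_words
  have hanodup : (ad.items.map (·.1)).Nodup := PySem.Dict.nodup_keys_ofList abstr_words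
  have hnval : ∀ p ∈ nd.items, nd.getD p.1 0 = p.2 := by
    intro p hp; obtain ⟨k, v⟩ := p
    exact PySem.Dict.getD_of_mem_items nd hp hnnodup 0
  have haval : ∀ p ∈ ad.items, ad.getD p.1 0 = p.2 := by
    intro p hp; obtain ⟨k, v⟩ := p
    exact PySem.Dict.getD_of_mem_items ad hp hanodup 0
  have hacont : ∀ p ∈ ad.items, ad.contains p.1 = true := by
    intro p hp
    rw [PySem.Dict.contains_iff_mem_keys]
    exact PySem.Dict.mem_keys_of_mem_items ad hp
  have hA := sub_dic_loop nd ad nd.items PySem.Dict.empty 0 hnnodup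
    (fun p _ => PySem.Dict.contains_empty p.1) hnval
  have hB := sub_dic_alt_loop ad ad.items nd hanodup hacont haval hnnodup
  have hBitems : (ad.items.foldl (fun (d : PySem.Dict String Int) p =>
      if d.contains p.1 then d.insert p.1 (max 0 (d.getD p.1 0 - p.2)) else d) nd).items
      = nd.items.map (pvBVal ad) := by
    rw [hB]
    refine List.map_congr_left ?_
    intro q _
    by_cases hc : q.1 ∈ ad.items.map (·.1)
    · simp [hc]
    · have hcc : ad.contains q.1 = false := by
        rw [← Bool.not_eq_true, PySem.Dict.contains_iff_mem_keys]
        exact hc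
      simp [hc, pvBVal, hcc]
  refine Prod.ext ?_ ?_
  · rw [hA.1, hBitems]; rfl
  · rw [hA.2]
    have hv : (ad.items.foldl (fun (d : PySem.Dict String Int) p =>
        if d.contains p.1 then d.insert p.1 (max 0 (d.getD p.1 0 - p.2)) else d) nd).values
        = (nd.items.map (pvBVal ad)).map (·.2) := by
      rw [show ∀ (d : PySem.Dict String Int), d.values = d.items.map (·.2) from fun _ => rfl, hBitems]
    dsimp only
    rw [hv, List.map_map]
    simp [Function.comp_def]
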